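-- pv_equiv track=rewrite | github.com/MarisGomez/intro-programacion | Guia Python/guia 7 - Funciones sobre listas (tipos complejos).py | resultado_materia
-- ===== SOURCE A (Python) =====
-- def resultado_materia(notas:list[int]) -> int:
--     contador_notas:int = 0
--     for nota in notas:
--         if nota >= 4:
--             contador_notas += nota
--         if nota < 4:
--             return 3
--
--     promedio = contador_notas/len(notas)
--
--     if promedio >= 7:
--         return 1
--     else:
--         return 2
-- ===== SOURCE B (Python) =====
-- def resultado_materia(notas: list[int]) -> int:
--     s = sorted(notas)
--     if s[0] < 4:
--         return 3
--     return 1 if sum(s) / len(s) >= 7 else 2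
-- ===== Notes on version B (the rewrite author's own statement) =====
-- stated objective: alternative
-- what changed: Instead of A's fused accumulate-and-early-return loop, B sorts the list once and tests only the head (the minimum) for a failing grade, then averages the sorted copy; O(n log n) but a genuinely different, loop-free strategy.
import Mathlib
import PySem

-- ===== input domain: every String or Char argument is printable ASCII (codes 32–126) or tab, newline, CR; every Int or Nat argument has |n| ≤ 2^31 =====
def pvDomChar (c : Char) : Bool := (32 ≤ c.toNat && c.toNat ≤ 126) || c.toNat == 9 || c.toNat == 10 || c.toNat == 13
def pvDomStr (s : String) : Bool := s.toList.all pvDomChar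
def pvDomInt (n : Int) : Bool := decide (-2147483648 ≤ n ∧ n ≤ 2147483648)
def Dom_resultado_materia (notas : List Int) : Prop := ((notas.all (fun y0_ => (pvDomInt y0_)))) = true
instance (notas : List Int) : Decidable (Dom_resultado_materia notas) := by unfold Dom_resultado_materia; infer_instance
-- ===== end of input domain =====

-- B sorts the list once, tests only the head (the minimum) for a failing grade, then averages the
-- sorted copy — an alternative, sort-based strategy instead of A's fused accumulate-and-early-return
-- loop. Python's float comparison sum/len >= 7 is ported exactly as the integer comparison 7*len ≤ sum.
-- ===== PORT A =====
def resultado_materia_loop : List Int → Int → Sum Int Int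
  | [], acc => Sum.inr acc
  | nota :: rest, acc =>
    let acc' := if nota ≥ 4 then acc + nota else acc
    if nota < 4 then Sum.inl 3 else resultado_materia_loop rest acc'

def resultado_materia (notas : List Int) : Int :=
  match resultado_materia_loop notas 0 with
  | Sum.inl r => r
  | Sum.inr contador_notas =>
    if 7 * (notas.length : Int) ≤ contador_notas then 1 else 2

-- ===== PORT B =====
def resultado_materia_alt (notas : List Int) : Int :=
  let s := PySem.List.sorted notas (fun x => x) false
  match s with
  | [] => 0  -- s[0] raises IndexError in Python; [] is excluded by Pre_resultado_materia
  | x :: _ =>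
    if x < 4 then 3
    else if 7 * (s.length : Int) ≤ s.sum then 1 else 2

-- ===== PRECONDITION & SPEC =====
-- Pre_ excludes the empty list, on which A raises ZeroDivisionError (0/0); B raises IndexError there.
def Pre_resultado_materia (notas : List Int) : Prop := notas ≠ []
instance (notas : List Int) : Decidable (Pre_resultado_materia notas) := by unfold Pre_resultado_materia; infer_instance
def pvWitness_resultado_materia : List Int := [7, 8]
def Spec_resultado_materia (notas : List Int) (out : Int) : Prop := out = resultado_materia_alt notas
instance (notas : List Int) (out : Int) : Decidable (Spec_resultado_materia notas out) := by unfold Spec_resultado_materia; infer_instance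

-- ===== CLAIM (what is proved, stated in full; the proofs are below) =====
def Claim_equal_resultado_materia : Prop := ∀ (notas : List Int), Dom_resultado_materia notas → Pre_resultado_materia notas → Spec_resultado_materia notas (resultado_materia notas)

-- ===== LEMMAS AND PROOFS =====
theorem loop_of_all_ge (notas : List Int) (acc : Int)
    (h : ∀ n ∈ notas, 4 ≤ n) :
    resultado_materia_loop notas acc = Sum.inr (acc + notas.sum) := by
  induction notas generalizing acc with
  | nil => simp [resultado_materia_loop]
  | cons n rest ih =>
    have hn : 4 ≤ n := h n (List.mem_cons_self ..)
    simp only [resultado_materia_loop]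
    rw [if_pos hn, if_neg (by omega)]
    rw [ih _ (fun m hm => h m (List.mem_cons_of_mem _ hm))]
    simp [List.sum_cons]; ring_nf

theorem loop_of_exists_lt (notas : List Int) (acc : Int)
    (h : ∃ n ∈ notas, n < 4) :
    resultado_materia_loop notas acc = Sum.inl 3 := by
  induction notas generalizing acc with
  | nil => simp at h
  | cons n rest ih =>
    simp only [resultado_materia_loop]
    by_cases hn : n < 4
    · rw [if_pos hn]
    · rw [if_neg hn]
      apply ih
      rcases h with ⟨m, hm, hlt⟩
      rcases List.mem_cons.mp hm with rfl | hm'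
      · exact absurd hlt hn
      · exact ⟨m, hm', hlt⟩

-- ===== VERDICT (by name: the statement is the Claim_ definition above) =====
theorem resultado_materia_spec : Claim_equal_resultado_materia := by
  intro notas _ hne
  unfold Spec_resultado_materia resultado_materia resultado_materia_alt
  have hperm := PySem.List.sorted_perm notas (fun x => x) false
  obtain ⟨x, t, hs⟩ : ∃ x t, PySem.List.sorted notas (fun x => x) false = x :: t := by
    rcases hx : PySem.List.sorted notas (fun x => x) false with _ | ⟨x, t⟩
    · rw [hx] at hperm; exact absurd hperm.symm.eq_nil hne
    · exact ⟨x, t, rfl⟩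
  have hsum : (x :: t).sum = notas.sum := by rw [← hs]; exact hperm.sum_eq
  have hlen : (x :: t).length = notas.length := by rw [← hs]; exact hperm.length_eq
  have hmin : ∀ y ∈ notas, x ≤ y := by
    intro y hy
    simpa using PySem.List.key_head_sorted_le (xs := notas) (key := fun x => x) hs y hy
  have hxmem : x ∈ notas := (hperm.mem_iff.mp (by rw [hs]; exact List.mem_cons_self ..))
  rw [hs]
  by_cases hx4 : x < 4
  · rw [loop_of_exists_lt notas 0 ⟨x, hxmem, hx4⟩]
    simp [hx4]
  · have hall : ∀ n ∈ notas, 4 ≤ n := fun n hn => le_trans (by omega) (hmin n hn)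
    rw [loop_of_all_ge notas 0 hall]
    simp only [if_neg hx4, zero_add, hsum, hlen]
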